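-- pv_equiv track=rewrite | github.com/sloweyyy/CS114.O11-22521145 | Week 2/NgonNguCuaLan.py | is_valid_clause
-- ===== SOURCE A (Python) =====
-- def is_adjective(word):
--     return word.endswith(("lios", "liala"))
--
-- def is_noun(word):
--     return word.endswith(("etr", "etra"))
--
-- def is_verb(word):
--     return word.endswith(("initis", "inites"))
--
-- def is_valid_word(word):
--     return (is_adjective(word) or
--             is_noun(word) or
--             is_verb(word))
--
-- def is_same_gender(word1, word2):
--     if word1.endswith(("lios", "etr", "initis")):
--         return word2.endswith(("lios", "etr", "initis"))
--     else:
--         return word2.endswith(("liala", "etra", "inites"))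
--
-- def is_valid_clause(clause):
--     words = clause.split()
--
--     has_adjective = False
--     has_noun = False
--     has_verb = False
--
--     for i, word in enumerate(words):
--         if not is_valid_word(word):
--             return False
--
--         if is_adjective(word):
--             has_adjective = True
--
--         if is_noun(word):
--             if has_noun:
--                 return False
--             has_noun = True
--
--         if is_verb(word):
--             has_verb = True
--
--         if i > 0 and not is_same_gender(words[i - 1], word):
--             return False
--
--     return has_adjective and has_noun and has_verb
-- ===== SOURCE B (Python) =====
-- def _classify(word):
--     for suf, typ, gen in (("lios", "a", "m"), ("liala", "a", "f"),
--                           ("etr", "n", "m"), ("etra", "n", "f"),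
--                           ("initis", "v", "m"), ("inites", "v", "f")):
--         if word.endswith(suf):
--             return (typ, gen)
--     return None
--
-- def is_valid_clause(clause):
--     infos = [_classify(w) for w in clause.split()]
--     if any(info is None for info in infos):
--         return False
--     types = [t for t, _ in infos]
--     genders = {g for _, g in infos}
--     return (len(genders) <= 1
--             and types.count("n") == 1
--             and "a" in types
--             and "v" in types)
-- ===== Notes on version B (the rewrite author's own statement) =====
-- stated objective: simpler
-- what changed: A validates in one stateful scan with early returns, pairwise adjacent-gender comparisons and has_* flags; B classifies every word once via a suffix table into (type, gender), then aggregates: any unclassified word fails, the gender set must have at most one element, noun count must be 1, and an adjective and a verb must occur.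
import Mathlib
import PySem

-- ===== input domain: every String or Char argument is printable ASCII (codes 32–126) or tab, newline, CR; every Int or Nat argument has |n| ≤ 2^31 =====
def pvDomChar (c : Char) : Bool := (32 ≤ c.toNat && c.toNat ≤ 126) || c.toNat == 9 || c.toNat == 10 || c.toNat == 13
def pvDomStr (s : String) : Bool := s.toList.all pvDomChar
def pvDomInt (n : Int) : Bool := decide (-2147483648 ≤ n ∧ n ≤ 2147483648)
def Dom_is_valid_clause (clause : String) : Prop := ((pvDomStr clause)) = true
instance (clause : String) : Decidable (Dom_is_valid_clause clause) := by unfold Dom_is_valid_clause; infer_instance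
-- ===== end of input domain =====

-- B replaces A's single stateful left-to-right scan (adjacent-pair gender checks, early
-- returns) by classify-each-word-then-aggregate (a gender set plus type counts/membership);
-- objective: a simpler, declarative decomposition of the same check.

-- ===== PORT A =====
def is_adjective (word : String) : Bool :=
  PySem.Str.endswith word "lios" || PySem.Str.endswith word "liala"
def is_noun (word : String) : Bool :=
  PySem.Str.endswith word "etr" || PySem.Str.endswith word "etra"
def is_verb (word : String) : Bool :=
  PySem.Str.endswith word "initis" || PySem.Str.endswith word "inites"
def is_valid_word (word : String) : Bool :=
  is_adjective word || is_noun word || is_verb word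
def is_same_gender (word1 word2 : String) : Bool :=
  if PySem.Str.endswith word1 "lios" || PySem.Str.endswith word1 "etr" ||
     PySem.Str.endswith word1 "initis" then
    PySem.Str.endswith word2 "lios" || PySem.Str.endswith word2 "etr" ||
      PySem.Str.endswith word2 "initis"
  else
    PySem.Str.endswith word2 "liala" || PySem.Str.endswith word2 "etra" ||
      PySem.Str.endswith word2 "inites"


-- the for-loop of A, with `prev` carrying words[i-1] (present iff i > 0)
def pvLoopA : List String → Option String → Bool → Bool → Bool → Bool
  | [], _, has_adjective, has_noun, has_verb => has_adjective && has_noun && has_verb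
  | word :: rest, prev, has_adjective, has_noun, has_verb =>
    if !is_valid_word word then false
    else
      let has_adjective := has_adjective || is_adjective word
      if is_noun word && has_noun then false
      else
        let has_noun := has_noun || is_noun word
        let has_verb := has_verb || is_verb word
        if (match prev with
            | some p => !is_same_gender p word
            | none => false) then false
        else pvLoopA rest (some word) has_adjective has_noun has_verb

def is_valid_clause (clause : String) : Bool :=
  pvLoopA (PySem.Str.split₀ clause) none false false false

-- ===== PORT B =====
def pvClassifyTable : List (String × String × String) :=
  [("lios", "a", "m"), ("liala", "a", "f"),
   ("etr", "n", "m"), ("etra", "n", "f"),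
   ("initis", "v", "m"), ("inites", "v", "f")]

def pvClassify (word : String) : Option (String × String) :=
  match pvClassifyTable.find? (fun e => PySem.Str.endswith word e.1) with
  | some e => some e.2
  | none => none

def is_valid_clause_alt (clause : String) : Bool :=
  let infos := (PySem.Str.split₀ clause).map pvClassify
  if infos.any (·.isNone) then false
  else
    let types := infos.filterMap (Option.map Prod.fst)
    let genders : PySem.Set String :=
      PySem.Set.ofList (infos.filterMap (Option.map Prod.snd))
    decide (PySem.Set.len genders ≤ 1) &&
      (PySem.List.count types "n" == 1) &&
      types.contains "a" && types.contains "v"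

-- ===== PRECONDITION & SPEC =====
def Spec_is_valid_clause (clause : String) (out : Bool) : Prop := out = is_valid_clause_alt clause
instance (clause : String) (out : Bool) : Decidable (Spec_is_valid_clause clause out) := by unfold Spec_is_valid_clause; infer_instance

-- ===== CLAIM (what is proved, stated in full; the proofs are below) =====
def Claim_equal_is_valid_clause : Prop := ∀ (clause : String), Dom_is_valid_clause clause → Spec_is_valid_clause clause (is_valid_clause clause)

-- ===== LEMMAS AND PROOFS =====

-- "gender is male" test of is_same_gender's first branch, and its female counterpart
def pvMale (w : String) : Bool :=
  PySem.Str.endswith w "lios" || PySem.Str.endswith w "etr" || PySem.Str.endswith w "initis"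
def pvFemale (w : String) : Bool :=
  PySem.Str.endswith w "liala" || PySem.Str.endswith w "etra" || PySem.Str.endswith w "inites"

def pvTy (w : String) : String :=
  if is_adjective w then "a" else if is_noun w then "n" else "v"

def pvGd (w : String) : String := if pvMale w then "m" else "f"

-- adjacent-gender chain as A checks it, with the previous word's gender carried along
def pvGOK : Option Bool → List String → Bool
  | _, [] => true
  | none, w :: ws => pvGOK (some (pvMale w)) ws
  | some g, w :: ws => (g == pvMale w) && pvGOK (some (pvMale w)) ws

lemma endswith_excl (w s1 s2 : String)
    (h1 : ¬ (s1.toList <:+ s2.toList)) (h2 : ¬ (s2.toList <:+ s1.toList))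
    (hw : PySem.Str.endswith w s1 = true) : PySem.Str.endswith w s2 = false := by
  by_contra h
  rw [PySem.Str.endswith_eq, PySem.Chars.endswith_iff] at hw
  simp only [Bool.not_eq_false] at h
  rw [PySem.Str.endswith_eq, PySem.Chars.endswith_iff] at h
  rcases List.suffix_or_suffix_of_suffix hw h with hc | hc
  · exact h1 hc
  · exact h2 hc

lemma male_not_female (w : String) (hm : pvMale w = true) : pvFemale w = false := by
  simp only [pvMale, Bool.or_eq_true] at hm
  rcases hm with (h | h) | h <;>
    simp only [pvFemale,
      endswith_excl w _ "liala" (by decide) (by decide) h,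
      endswith_excl w _ "etra" (by decide) (by decide) h,
      endswith_excl w _ "inites" (by decide) (by decide) h, Bool.or_self]

lemma valid_not_male (w : String) (hv : is_valid_word w = true) (hm : pvMale w = false) :
    pvFemale w = true := by
  simp only [pvMale, Bool.or_eq_false_iff] at hm
  obtain ⟨⟨h1, h2⟩, h3⟩ := hm
  simp only [is_valid_word, is_adjective, is_noun, is_verb, h1, h2, h3, Bool.false_or, Bool.or_eq_true] at hv
  simp [pvFemale, Bool.or_eq_true]
  tauto

lemma adj_not_noun (w : String) (h : is_adjective w = true) : is_noun w = false := by
  simp only [is_adjective, Bool.or_eq_true] at h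
  rcases h with h | h <;>
    simp only [is_noun,
      endswith_excl w _ "etr" (by decide) (by decide) h,
      endswith_excl w _ "etra" (by decide) (by decide) h, Bool.or_self]

lemma adj_not_verb (w : String) (h : is_adjective w = true) : is_verb w = false := by
  simp only [is_adjective, Bool.or_eq_true] at h
  rcases h with h | h <;>
    simp only [is_verb,
      endswith_excl w _ "initis" (by decide) (by decide) h,
      endswith_excl w _ "inites" (by decide) (by decide) h, Bool.or_self]

lemma noun_not_verb (w : String) (h : is_noun w = true) : is_verb w = false := by
  simp only [is_noun, Bool.or_eq_true] at h
  rcases h with h | h <;>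
    simp only [is_verb,
      endswith_excl w _ "initis" (by decide) (by decide) h,
      endswith_excl w _ "inites" (by decide) (by decide) h, Bool.or_self]

lemma same_gender_eq (p w : String) (hw : is_valid_word w = true) :
    is_same_gender p w = (pvMale p == pvMale w) := by
  have hsg : is_same_gender p w = if pvMale p then pvMale w else pvFemale w := rfl
  rw [hsg]
  cases hp : pvMale p
  · cases hw2 : pvMale w
    · rw [if_neg (by simp), valid_not_male w hw hw2]; rfl
    · rw [if_neg (by simp), male_not_female w hw2]; rfl
  · rw [if_pos rfl, Bool.true_beq]

lemma classify_isNone (w : String) : (pvClassify w).isNone = !is_valid_word w := by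
  rw [pvClassify, pvClassifyTable]
  rcases h1 : PySem.Str.endswith w "lios" with _|_ <;>
  rcases h2 : PySem.Str.endswith w "liala" with _|_ <;>
  rcases h3 : PySem.Str.endswith w "etr" with _|_ <;>
  rcases h4 : PySem.Str.endswith w "etra" with _|_ <;>
  rcases h5 : PySem.Str.endswith w "initis" with _|_ <;>
  rcases h6 : PySem.Str.endswith w "inites" with _|_ <;>
    simp only [List.find?, h1, h2, h3, h4, h5, h6, is_valid_word, is_adjective, is_noun,
      is_verb, Bool.or_false,  Bool.or_true,  Option.isNone,
      Bool.not_true, Bool.not_false]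

lemma classify_valid (w : String) (hv : is_valid_word w = true) :
    pvClassify w = some (pvTy w, pvGd w) := by
  rw [pvClassify, pvClassifyTable]
  rcases h1 : PySem.Str.endswith w "lios" with _|_
  · rcases h2 : PySem.Str.endswith w "liala" with _|_
    · rcases h3 : PySem.Str.endswith w "etr" with _|_
      · rcases h4 : PySem.Str.endswith w "etra" with _|_
        · rcases h5 : PySem.Str.endswith w "initis" with _|_
          · rcases h6 : PySem.Str.endswith w "inites" with _|_
            · exfalso
              simp only [is_valid_word, is_adjective, is_noun, is_verb, h1, h2, h3, h4, h5,
                h6, Bool.or_self] at hv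
              exact Bool.false_ne_true hv
            · simp only [List.find?, h1, h2, h3, h4, h5, h6, pvTy, pvGd, is_adjective, is_noun,
                pvMale, Bool.or_false,  if_neg,  Bool.false_eq_true,
                not_false_iff]
          · simp only [List.find?, h1, h2, h3, h4, h5, pvTy, pvGd, is_adjective, is_noun,
              pvMale, Bool.or_false,  Bool.or_true, if_neg, Bool.false_eq_true,
              not_false_iff, if_true]
        · have h5 := endswith_excl w "etra" "initis" (by decide) (by decide) h4
          simp only [List.find?, h1, h2, h3, h4, pvTy, pvGd, is_adjective, is_noun, pvMale,
            h5, Bool.or_false,  Bool.or_true, if_neg, Bool.false_eq_true,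
            not_false_iff, if_true]
      · have h5 := endswith_excl w "etr" "initis" (by decide) (by decide) h3
        simp only [List.find?, h1, h2, h3, pvTy, pvGd, is_adjective, is_noun, pvMale, h5,
          Bool.or_false,  Bool.or_true, Bool.true_or, if_neg, Bool.false_eq_true,
          not_false_iff, if_true]
    · have h3 := endswith_excl w "liala" "etr" (by decide) (by decide) h2
      have h4 := endswith_excl w "liala" "etra" (by decide) (by decide) h2
      have h5 := endswith_excl w "liala" "initis" (by decide) (by decide) h2
      simp only [List.find?, h1, h2, h3,  h5, pvTy, pvGd, is_adjective, pvMale,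
        Bool.or_false,  Bool.or_true, if_neg, Bool.false_eq_true,
        not_false_iff, if_true]
  · have h3 := endswith_excl w "lios" "etr" (by decide) (by decide) h1
    have h5 := endswith_excl w "lios" "initis" (by decide) (by decide) h1
    simp only [List.find?, h1, h3, h5, pvTy, pvGd, is_adjective, pvMale, Bool.true_or,
      Bool.or_false,  if_true]

lemma ty_n (w : String) : (pvTy w == "n") = is_noun w := by
  rw [pvTy]
  cases ha : is_adjective w
  · cases hn : is_noun w <;> simp 
  · rw [if_pos rfl, adj_not_noun w ha]; rfl

lemma ty_a (w : String) (_hv : is_valid_word w = true) : (pvTy w == "a") = is_adjective w := by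
  rw [pvTy]
  cases ha : is_adjective w
  · cases hn : is_noun w <;> simp 
  · simp

lemma ty_v (w : String) (hv : is_valid_word w = true) : (pvTy w == "v") = is_verb w := by
  rw [pvTy]
  cases ha : is_adjective w
  · cases hn : is_noun w
    · rw [if_neg (by simp), if_neg (by simp)]
      simp only [is_valid_word, ha, hn, Bool.false_or] at hv
      simp [hv]
    · rw [if_neg (by simp), if_pos rfl, noun_not_verb w hn]; rfl
  · rw [if_pos rfl, adj_not_verb w ha]; rfl

lemma pvLoopA_cons_none (w : String) (ws : List String) (ha hn hv : Bool) :
    pvLoopA (w :: ws) none ha hn hv =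
      (if !is_valid_word w then false
       else if is_noun w && hn then false
       else pvLoopA ws (some w) (ha || is_adjective w) (hn || is_noun w) (hv || is_verb w)) := by
  rfl

lemma pvLoopA_cons_some (w : String) (ws : List String) (p : String) (ha hn hv : Bool) :
    pvLoopA (w :: ws) (some p) ha hn hv =
      (if !is_valid_word w then false
       else if is_noun w && hn then false
       else if !is_same_gender p w then false
       else pvLoopA ws (some w) (ha || is_adjective w) (hn || is_noun w) (hv || is_verb w)) := by
  rfl

lemma loopA_char (ws : List String) (prev : Option String) (ha hn hv : Bool) :
    pvLoopA ws prev ha hn hv =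
      (ws.all is_valid_word && pvGOK (prev.map pvMale) ws &&
       decide (ws.countP is_noun + (if hn then 1 else 0) = 1) &&
       (ha || ws.any is_adjective) && (hv || ws.any is_verb)) := by
  induction ws generalizing prev ha hn hv with
  | nil =>
    cases hn <;> simp [pvLoopA, pvGOK]
  | cons w ws ih =>
    have hcount : ∀ hn : Bool, (is_noun w && hn) = false →
        (ws.countP is_noun + (if (hn || is_noun w) then 1 else 0))
          = ((w :: ws).countP is_noun + (if hn then 1 else 0)) := by
      intro hn hnh
      rw [List.countP_cons]
      cases hb : is_noun w <;> cases hn <;> simp_all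
    cases prev with
    | none =>
      rw [pvLoopA_cons_none]
      cases hvw : is_valid_word w
      · simp [hvw]
      · rw [if_neg (by simp)]
        cases hnh : (is_noun w && hn)
        · rw [if_neg (by simp ), ih]
          simp only [Option.map_none, Option.map_some, pvGOK, List.all_cons, hvw,
            Bool.true_and, List.any_cons]
          rw [hcount hn hnh]
          cases ha <;> cases hv <;> simp 
        · rw [if_pos (by simp )]
          simp only [Bool.and_eq_true] at hnh
          have : ¬ ((w :: ws).countP is_noun + (if hn then 1 else 0) = 1) := by
            rw [List.countP_cons]
            simp only [hnh.1, hnh.2,  if_pos]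
            omega
          simp [this]
    | some p =>
      rw [pvLoopA_cons_some]
      cases hvw : is_valid_word w
      · simp [hvw]
      · rw [if_neg (by simp)]
        cases hnh : (is_noun w && hn)
        · rw [if_neg (by simp ), same_gender_eq p w hvw]
          cases hg : (pvMale p == pvMale w)
          · rw [if_pos (by simp )]
            simp [pvGOK, hg]
          · rw [if_neg (by simp ), ih]
            simp only [Option.map_some, pvGOK, List.all_cons, hvw, Bool.true_and, hg,
              List.any_cons]
            rw [hcount hn hnh]
            cases ha <;> cases hv <;> simp 
        · rw [if_pos (by simp )]
          simp only [Bool.and_eq_true] at hnh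
          have : ¬ ((w :: ws).countP is_noun + (if hn then 1 else 0) = 1) := by
            rw [List.countP_cons]
            simp only [hnh.1, hnh.2,  if_pos]
            omega
          simp [this]

lemma gok_some_iff (g : Bool) (ws : List String) :
    pvGOK (some g) ws = true ↔ ∀ x ∈ ws, pvMale x = g := by
  induction ws generalizing g with
  | nil => simp [pvGOK]
  | cons w ws ih =>
    rw [pvGOK, Bool.and_eq_true, ih]
    constructor
    · rintro ⟨h1, h2⟩ x hx
      rcases List.mem_cons.mp hx with rfl | hx
      · exact (beq_iff_eq.mp h1).symm
      · exact (h2 x hx).trans (beq_iff_eq.mp h1).symm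
    · intro h
      refine ⟨beq_iff_eq.mpr (h w (List.mem_cons_self)).symm, fun x hx => ?_⟩
      exact (h x (List.mem_cons_of_mem _ hx)).trans (h w List.mem_cons_self).symm

lemma gok_none_iff (ws : List String) :
    pvGOK (none : Option Bool) ws = true ↔ ∀ x ∈ ws, ∀ y ∈ ws, pvMale x = pvMale y := by
  cases ws with
  | nil => simp [pvGOK]
  | cons w ws =>
    rw [pvGOK, gok_some_iff]
    constructor
    · intro h x hx y hy
      have hx' : pvMale x = pvMale w := by
        rcases List.mem_cons.mp hx with h1 | h1
        · rw [h1]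
        · exact h x h1
      have hy' : pvMale y = pvMale w := by
        rcases List.mem_cons.mp hy with h1 | h1
        · rw [h1]
        · exact h y h1
      rw [hx', hy']
    · intro h x hx
      exact h x (List.mem_cons_of_mem _ hx) w List.mem_cons_self

lemma setlen_iff (gs : List String) :
    PySem.Set.len (PySem.Set.ofList gs) ≤ 1 ↔ ∀ x ∈ gs, ∀ y ∈ gs, x = y := by
  have hlen : PySem.Set.len (PySem.Set.ofList gs) = ((PySem.Set.ofList gs).length : Int) := rfl
  rw [hlen]
  have hmem := fun y => PySem.Set.mem_ofList gs y
  have hnd := PySem.Set.nodup_ofList gs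
  constructor
  · intro h x hx y hy
    match hl : PySem.Set.ofList gs with
    | [] => exact absurd ((hmem x).mpr hx) (by simp [hl])
    | [a] =>
      have h1 : x = a := by have := (hmem x).mpr hx; rw [hl] at this; simpa using this
      have h2 : y = a := by have := (hmem y).mpr hy; rw [hl] at this; simpa using this
      rw [h1, h2]
    | a :: b :: l => rw [hl] at h; simp at h; omega
  · intro h
    match hl : PySem.Set.ofList gs with
    | [] => simp
    | [a] => simp
    | a :: b :: l =>
      exfalso
      have ha : a ∈ gs := (hmem a).mp (by simp [hl])
      have hb : b ∈ gs := (hmem b).mp (by simp [hl])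
      rw [hl] at hnd
      exact (List.nodup_cons.mp hnd).1 (by simp [h a ha b hb])

lemma gd_eq_iff (x y : String) : pvGd x = pvGd y ↔ pvMale x = pvMale y := by
  rw [pvGd, pvGd]
  cases pvMale x <;> cases pvMale y <;> simp

lemma filterMap_fst (ws : List String) (hall : ∀ w ∈ ws, is_valid_word w = true) :
    ((ws.map pvClassify).filterMap (Option.map Prod.fst)) = ws.map pvTy := by
  induction ws with
  | nil => rfl
  | cons w ws ih =>
    rw [List.map_cons, List.filterMap_cons,
      classify_valid w (hall w List.mem_cons_self)]
    simpa using ih (fun x hx => hall x (List.mem_cons_of_mem _ hx))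

lemma filterMap_snd (ws : List String) (hall : ∀ w ∈ ws, is_valid_word w = true) :
    ((ws.map pvClassify).filterMap (Option.map Prod.snd)) = ws.map pvGd := by
  induction ws with
  | nil => rfl
  | cons w ws ih =>
    rw [List.map_cons, List.filterMap_cons,
      classify_valid w (hall w List.mem_cons_self)]
    simpa using ih (fun x hx => hall x (List.mem_cons_of_mem _ hx))

lemma any_none (ws : List String) :
    (ws.map pvClassify).any (·.isNone) = !ws.all is_valid_word := by
  rw [List.any_map, List.not_all_eq_any_not]
  have : ((fun (x : Option (String × String)) => x.isNone) ∘ pvClassify)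
      = fun w => !is_valid_word w :=
    funext (fun w => by simp only [Function.comp_apply, classify_isNone])
  rw [this]

lemma pv_main (clause : String) : pvLoopA (PySem.Str.split₀ clause) none false false false =
    (let infos := (PySem.Str.split₀ clause).map pvClassify
     if infos.any (·.isNone) then false
     else
       let types := infos.filterMap (Option.map Prod.fst)
       let genders : PySem.Set String :=
         PySem.Set.ofList (infos.filterMap (Option.map Prod.snd))
       decide (PySem.Set.len genders ≤ 1) &&
         (PySem.List.count types "n" == 1) &&
         types.contains "a" && types.contains "v") := by
  rw [loopA_char]
  set ws := PySem.Str.split₀ clause with hws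
  simp only [any_none]
  rcases hall : ws.all is_valid_word with _|_
  · simp
  · have hallm : ∀ w ∈ ws, is_valid_word w = true := by
      intro w hw; exact List.all_eq_true.mp hall w hw
    simp only [Bool.not_true,  filterMap_fst ws hallm, filterMap_snd ws hallm,
      Bool.true_and, Option.map_none]
    have e1 : decide (PySem.Set.len (PySem.Set.ofList (ws.map pvGd)) ≤ 1) = pvGOK none ws := by
      rcases hg : pvGOK (none : Option Bool) ws with _|_
      · simp only [decide_eq_false_iff_not, setlen_iff]
        intro hcon
        have ht : pvGOK (none : Option Bool) ws = true :=
          (gok_none_iff ws).mpr (fun x hx y hy => (gd_eq_iff x y).mp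
            (hcon _ (List.mem_map_of_mem hx) _ (List.mem_map_of_mem hy)))
        rw [hg] at ht
        exact Bool.false_ne_true ht
      · simp only [decide_eq_true_eq, setlen_iff]
        intro x hx y hy
        obtain ⟨x', hx', rfl⟩ := List.mem_map.mp hx
        obtain ⟨y', hy', rfl⟩ := List.mem_map.mp hy
        exact (gd_eq_iff x' y').mpr ((gok_none_iff ws).mp hg x' hx' y' hy')
    have e2 : ((PySem.List.count (ws.map pvTy) "n") == 1) =
        decide (ws.countP is_noun + (if false then 1 else 0) = 1) := by
      have hc : PySem.List.count (ws.map pvTy) "n" = (ws.map pvTy).count "n" := rfl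
      rw [hc, List.count, List.countP_map]
      have : ws.countP ((fun x => x == "n") ∘ pvTy) = ws.countP is_noun :=
        List.countP_congr (fun w _ => by simp only [Function.comp_apply, ty_n])
      rw [this]
      by_cases h : ws.countP is_noun = 1 <;> simp [h]
    have e3 : (ws.map pvTy).contains "a" = ws.any is_adjective := by
      rw [List.contains_eq_mem]
      rcases ha : ws.any is_adjective with _|_
      · simp only [decide_eq_false_iff_not, List.mem_map]
        rintro ⟨w, hw, hty⟩
        have : is_adjective w = true := by
          rw [← ty_a w (hallm w hw)]; simp [hty]
        exact Bool.false_ne_true (ha ▸ List.any_eq_true.mpr ⟨w, hw, this⟩)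
      · obtain ⟨w, hw, hadj⟩ := List.any_eq_true.mp ha
        simp only [decide_eq_true_eq, List.mem_map]
        exact ⟨w, hw, by rw [← beq_iff_eq, ty_a w (hallm w hw)]; exact hadj⟩
    have e4 : (ws.map pvTy).contains "v" = ws.any is_verb := by
      rw [List.contains_eq_mem]
      rcases ha : ws.any is_verb with _|_
      · simp only [decide_eq_false_iff_not, List.mem_map]
        rintro ⟨w, hw, hty⟩
        have : is_verb w = true := by
          rw [← ty_v w (hallm w hw)]; simp [hty]
        exact Bool.false_ne_true (ha ▸ List.any_eq_true.mpr ⟨w, hw, this⟩)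
      · obtain ⟨w, hw, hvb⟩ := List.any_eq_true.mp ha
        simp only [decide_eq_true_eq, List.mem_map]
        exact ⟨w, hw, by rw [← beq_iff_eq, ty_v w (hallm w hw)]; exact hvb⟩
    rw [e1, e2, e3, e4]
    simp [ Bool.and_comm, Bool.and_left_comm]

-- ===== VERDICT (by name: the statement is the Claim_ definition above) =====
theorem is_valid_clause_spec : Claim_equal_is_valid_clause := by
  intro clause _
  exact pv_main clause
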